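-- pv_equiv track=rewrite | github.com/feliciatrinh/coding-challenges-and-review | microsoft/max_value_insert_digit.py | insert_digit
-- ===== SOURCE A (Python) =====
-- def insert_digit(num, digit):
--     """
--     Expanded solution to allow inserting digits besides '5'
--     Runtime: O(N), Space: O(1) or O(N)?
--     """
--     str_num = str(num)
--     for i, d in enumerate(str_num):
--         if d == '-':
--             continue
--         d = int(d)
--         if (num >= 0 and d < digit) or (num < 0 and d > digit):
--             return int(str_num[:i] + str(digit) + str_num[i:])
--     return int(str(num) + str(digit))
-- ===== SOURCE B (Python) =====
-- def insert_digit(num, digit):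
--     s = str(num)
--     if num >= 0:
--         cands = [s[:i] + str(digit) + s[i:] for i in range(len(s) + 1)]
--         return int(max(cands))
--     body = s[1:]
--     cands = [body[:i] + str(digit) + body[i:] for i in range(len(body) + 1)]
--     return -int(min(cands))
-- ===== Notes on version B (the rewrite author's own statement) =====
-- stated objective: alternative
-- what changed: B enumerates every valid insertion position, builds all candidate strings and takes the lexicographic maximum (minimum of the magnitude for negative num), instead of A's greedy scan for the first improving position with an early return.
-- outside the precondition, e.g. on insert_digit(5, 12): A returns 125, B returns 512; on insert_digit(7, -3): A raises ValueError, B raises ValueError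
import Mathlib
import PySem

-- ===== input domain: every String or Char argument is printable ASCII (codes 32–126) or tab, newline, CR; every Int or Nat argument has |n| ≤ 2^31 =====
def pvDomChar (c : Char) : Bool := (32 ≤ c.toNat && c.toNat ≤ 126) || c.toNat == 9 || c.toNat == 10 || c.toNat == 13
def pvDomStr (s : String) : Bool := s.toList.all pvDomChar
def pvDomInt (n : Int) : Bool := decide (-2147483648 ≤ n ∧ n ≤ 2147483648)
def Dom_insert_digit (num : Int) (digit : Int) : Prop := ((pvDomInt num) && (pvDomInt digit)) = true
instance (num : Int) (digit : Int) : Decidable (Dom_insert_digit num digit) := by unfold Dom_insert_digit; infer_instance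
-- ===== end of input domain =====

-- B enumerates all insertion positions and takes the lexicographic extremum of the equal-length
-- candidate strings instead of A's greedy first-improving-position scan (objective: alternative).

-- ===== PORT A =====
-- the for-loop over enumerate(str_num) with its early 'return' ('continue' on '-')
def insertDigitLoop (num digit : Int) (str_num : List Char) : List (Int × Char) → Option Int
  | [] => none
  | (i, d) :: rest =>
    if d = '-' then insertDigitLoop num digit str_num rest
    else
      if (num ≥ 0 ∧ (PySem.Int.ofChars? [d]).getD 0 < digit) ∨
         (num < 0 ∧ (PySem.Int.ofChars? [d]).getD 0 > digit) then
        some ((PySem.Int.ofChars? (PySem.List.slice str_num none (some i) ++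
          PySem.Int.toChars digit ++ PySem.List.slice str_num (some i) none)).getD 0)
      else insertDigitLoop num digit str_num rest

def insert_digit (num : Int) (digit : Int) : Int :=
  let str_num := PySem.Int.toChars num
  (insertDigitLoop num digit str_num (PySem.List.enumerate str_num 0)).getD
    ((PySem.Int.ofChars? (PySem.Int.toChars num ++ PySem.Int.toChars digit)).getD 0)

-- ===== PORT B =====
def insert_digit_alt (num : Int) (digit : Int) : Int :=
  let s := PySem.Int.toChars num
  if num ≥ 0 then
    let cands := (PySem.List.pyRange 0 (PySem.List.len s + 1) 1).map (fun i =>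
      PySem.List.slice s none (some i) ++ PySem.Int.toChars digit ++ PySem.List.slice s (some i) none);
    (PySem.Int.ofChars? ((PySem.List.max? cands (fun x => x)).getD [])).getD 0
  else
    let body := PySem.List.slice s (some 1) none
    let cands := (PySem.List.pyRange 0 (PySem.List.len body + 1) 1).map (fun i =>
      PySem.List.slice body none (some i) ++ PySem.Int.toChars digit ++ PySem.List.slice body (some i) none);
    -((PySem.Int.ofChars? ((PySem.List.min? cands (fun x => x)).getD [])).getD 0)

-- ===== PRECONDITION & SPEC =====
-- Pre_ restricts digit to an actual decimal digit 0–9: for digit < 0 A always raises ValueError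
-- (the inserted '-' makes int() fail), and for digit ≥ 10 "insert a digit" is unspecified and
-- A's greedy result and B's extremum are two different defensible readings of that corner.
def Pre_insert_digit (num : Int) (digit : Int) : Prop := 0 ≤ digit ∧ digit ≤ 9
instance (num : Int) (digit : Int) : Decidable (Pre_insert_digit num digit) := by unfold Pre_insert_digit; infer_instance
def pvWitness_insert_digit : Int × Int := (12, 5)

def Spec_insert_digit (num : Int) (digit : Int) (out : Int) : Prop := out = insert_digit_alt num digit
instance (num : Int) (digit : Int) (out : Int) : Decidable (Spec_insert_digit num digit out) := by unfold Spec_insert_digit; infer_instance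

-- ===== CLAIM (what is proved, stated in full; the proofs are below) =====
def Claim_equal_insert_digit : Prop := ∀ (num : Int) (digit : Int), Dom_insert_digit num digit → Pre_insert_digit num digit → Spec_insert_digit num digit (insert_digit num digit)

-- ===== LEMMAS AND PROOFS =====

-- value of a decimal digit character
def valD (d : Char) : Int := (d.toNat : Int) - 48

-- the string with c inserted at position k (k ≤ s.length)
def insAt (s : List Char) (k : Nat) (c : Char) : List Char := s.take k ++ c :: s.drop k

-- index of the first char satisfying q (s.length if none)
def gIdx (q : Char → Bool) : List Char → Nat
  | [] => 0
  | a :: t => if q a then 0 else gIdx q t + 1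

-- A's loop condition as a char predicate
def qA (num digit : Int) (d : Char) : Bool :=
  decide ((num ≥ 0 ∧ valD d < digit) ∨ (num < 0 ∧ valD d > digit))

-- the value A returns when it inserts at Int position i of s
def retA (num digit : Int) (s : List Char) (i : Int) : Int :=
  (PySem.Int.ofChars? (PySem.List.slice s none (some i) ++
    PySem.Int.toChars digit ++ PySem.List.slice s (some i) none)).getD 0

theorem char_eq_of_toNat {a b : Char} (h : a.toNat = b.toNat) : a = b := by
  apply Char.ext; exact UInt32.toNat_inj.mp h

theorem digit_toNat {c : Char} (h : c.isDigit = true) : 48 ≤ c.toNat ∧ c.toNat ≤ 57 := by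
  simp [Char.isDigit] at h; exact ⟨h.1, h.2⟩

theorem digit_mem {c : Char} (h : c.isDigit = true) :
    c ∈ ['0','1','2','3','4','5','6','7','8','9'] := by
  obtain ⟨h1, h2⟩ := digit_toNat h
  have h10 : c.toNat = 48 ∨ c.toNat = 49 ∨ c.toNat = 50 ∨ c.toNat = 51 ∨ c.toNat = 52 ∨
      c.toNat = 53 ∨ c.toNat = 54 ∨ c.toNat = 55 ∨ c.toNat = 56 ∨ c.toNat = 57 := by omega
  rcases h10 with h'|h'|h'|h'|h'|h'|h'|h'|h'|h'
  · obtain rfl : c = '0' := char_eq_of_toNat (by rw [h']; decide); decide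
  · obtain rfl : c = '1' := char_eq_of_toNat (by rw [h']; decide); decide
  · obtain rfl : c = '2' := char_eq_of_toNat (by rw [h']; decide); decide
  · obtain rfl : c = '3' := char_eq_of_toNat (by rw [h']; decide); decide
  · obtain rfl : c = '4' := char_eq_of_toNat (by rw [h']; decide); decide
  · obtain rfl : c = '5' := char_eq_of_toNat (by rw [h']; decide); decide
  · obtain rfl : c = '6' := char_eq_of_toNat (by rw [h']; decide); decide
  · obtain rfl : c = '7' := char_eq_of_toNat (by rw [h']; decide); decide
  · obtain rfl : c = '8' := char_eq_of_toNat (by rw [h']; decide); decide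
  · obtain rfl : c = '9' := char_eq_of_toNat (by rw [h']; decide); decide

theorem digit_not_space {c : Char} (h : c.isDigit = true) : PySem.Int.isIntSpace c = false := by
  obtain ⟨h1, h2⟩ := digit_toNat h
  simp only [PySem.Int.isIntSpace, Bool.or_eq_false_iff, decide_eq_false_iff_not]
  refine ⟨⟨⟨⟨⟨?_, ?_⟩, ?_⟩, ?_⟩, ?_⟩, ?_⟩ <;> (intro rfl; simp_all)

theorem parse_single {c : Char} (h : c.isDigit = true) :
    (PySem.Int.ofChars? [c]).getD 0 = valD c := by
  have := digit_mem h
  fin_cases this <;> decide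

theorem digit_lt_iff {a b : Char} (ha : a.isDigit = true) (hb : b.isDigit = true) :
    a < b ↔ valD a < valD b := by
  have h1 := digit_toNat ha
  have h2 := digit_toNat hb
  rw [Char.lt_def, UInt32.lt_iff_toNat_lt]
  have e1 : a.toNat = a.val.toNat := rfl
  have e2 : b.toNat = b.val.toNat := rfl
  rw [e1] at h1; rw [e2] at h2
  unfold valD
  rw [e1, e2]
  omega

theorem stripId (x : List Char) (h1 : ∀ c ∈ x, PySem.Int.isIntSpace c = false) :
    (List.dropWhile PySem.Int.isIntSpace (List.dropWhile PySem.Int.isIntSpace x).reverse).reverse = x := by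
  cases x with
  | nil => simp
  | cons a t =>
    rw [List.dropWhile_cons_of_neg (by simp [h1 a (by simp)])]
    rcases List.eq_nil_or_concat (a :: t) with h | ⟨u, b, hub⟩
    · simp at h
    · rw [hub, List.concat_eq_append, List.reverse_append, List.reverse_singleton,
        List.singleton_append,
        List.dropWhile_cons_of_neg (by simp [h1 b (by rw [hub]; simp)])]
      simp

-- int("-" + digits) = -int(digits): both sides expose the same private digit parser
theorem negParse (x : List Char) (hd : ∀ c ∈ x, c.isDigit = true) :
    PySem.Int.ofChars? ('-' :: x) = (PySem.Int.ofChars? x).map (fun n => -n) := by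
  have hsp : ∀ c ∈ x, PySem.Int.isIntSpace c = false := fun c hc => digit_not_space (hd c hc)
  have hsp' : ∀ c ∈ ('-' :: x), PySem.Int.isIntSpace c = false := by
    intro c hc
    rcases List.mem_cons.mp hc with h | h
    · subst h; decide
    · exact hsp c h
  unfold PySem.Int.ofChars?
  rw [stripId _ hsp', stripId _ hsp]
  dsimp only
  split
  case h_2 => simp_all
  case h_3 => rename_i h1 h2; exact absurd rfl (h1 x)
  case h_1 =>
    rename_i ds heq
    injection heq with _ hx
    subst hx
    split
    · exact absurd (hd '-' (by simp)) (by decide)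
    · exact absurd (hd '+' (by simp)) (by decide)
    · simp

theorem digitChar_isDigit {n : Nat} (h : n < 10) : (Nat.digitChar n).isDigit = true := by
  interval_cases n <;> decide

theorem tdc_digits : ∀ (fuel n : Nat) (acc : List Char), (∀ c ∈ acc, c.isDigit = true) →
    ∀ c ∈ Nat.toDigitsCore 10 fuel n acc, c.isDigit = true := by
  intro fuel
  induction fuel with
  | zero =>
    intro n acc hacc c hc
    rw [Nat.toDigitsCore] at hc
    exact hacc c hc
  | succ f ih =>
    intro n acc hacc c hc
    rw [Nat.toDigitsCore] at hc
    have hacc' : ∀ c ∈ (Nat.digitChar (n % 10) :: acc), c.isDigit = true := by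
      intro c hc
      rcases List.mem_cons.mp hc with h | h
      · subst h; exact digitChar_isDigit (Nat.mod_lt _ (by omega))
      · exact hacc c h
    by_cases h : n / 10 = 0
    · rw [if_pos h] at hc; exact hacc' c hc
    · rw [if_neg h] at hc; exact ih (n / 10) _ hacc' c hc

theorem toDigits_digits (n : Nat) : ∀ c ∈ Nat.toDigits 10 n, c.isDigit = true :=
  tdc_digits (n + 1) n [] (by simp)

theorem toChars_nonneg {num : Int} (h : 0 ≤ num) :
    PySem.Int.toChars num = Nat.toDigits 10 num.toNat := by
  simp [PySem.Int.toChars, not_lt.mpr h]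

theorem toChars_neg {num : Int} (h : num < 0) :
    PySem.Int.toChars num = '-' :: Nat.toDigits 10 num.natAbs := by
  simp [PySem.Int.toChars, h]

-- str(digit) for digit in [0,9] is a single digit char of value digit
theorem toChars_digit {digit : Int} (h0 : 0 ≤ digit) (h9 : digit ≤ 9) :
    ∃ c : Char, PySem.Int.toChars digit = [c] ∧ c.isDigit = true ∧ valD c = digit := by
  interval_cases digit
  · exact ⟨'0', by decide, by decide, by decide⟩
  · exact ⟨'1', by decide, by decide, by decide⟩
  · exact ⟨'2', by decide, by decide, by decide⟩
  · exact ⟨'3', by decide, by decide, by decide⟩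
  · exact ⟨'4', by decide, by decide, by decide⟩
  · exact ⟨'5', by decide, by decide, by decide⟩
  · exact ⟨'6', by decide, by decide, by decide⟩
  · exact ⟨'7', by decide, by decide, by decide⟩
  · exact ⟨'8', by decide, by decide, by decide⟩
  · exact ⟨'9', by decide, by decide, by decide⟩

theorem gIdx_le (q : Char → Bool) (s : List Char) : gIdx q s ≤ s.length := by
  induction s with
  | nil => simp [gIdx]
  | cons a t ih => by_cases h : q a <;> simp [gIdx, h] <;> omega

theorem insAt_zero (s : List Char) (c : Char) : insAt s 0 c = c :: s := by simp [insAt]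

theorem insAt_succ_cons (a : Char) (t : List Char) (j : Nat) (c : Char) :
    insAt (a :: t) (j + 1) c = a :: insAt t j c := by simp [insAt]

theorem insAt_length (s : List Char) (c : Char) : insAt s s.length c = s ++ [c] := by
  simp [insAt]

theorem insAt_digits {s : List Char} {c : Char} (hs : ∀ d ∈ s, d.isDigit = true)
    (hc : c.isDigit = true) (k : Nat) : ∀ d ∈ insAt s k c, d.isDigit = true := by
  intro d hd
  unfold insAt at hd
  rcases List.mem_append.mp hd with h | h
  · exact hs d (List.mem_of_mem_take h)
  · rcases List.mem_cons.mp h with h | h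
    · subst h; exact hc
    · exact hs d (List.mem_of_mem_drop h)

-- characterization of A's loop over an all-digit tail
theorem loopA_enum (num digit : Int) (s : List Char) :
    ∀ (t : List Char) (k : Int), (∀ c ∈ t, c.isDigit = true) →
    insertDigitLoop num digit s (PySem.List.enumerate t k) =
      if gIdx (qA num digit) t < t.length
      then some (retA num digit s (k + (gIdx (qA num digit) t : Int)))
      else none := by
  intro t
  induction t with
  | nil => intro k _; simp [PySem.List.enumerate_nil, insertDigitLoop]
  | cons a t' ih =>
    intro k hd
    have ha : a.isDigit = true := hd a (by simp)
    have hdash : ¬ a = '-' := by intro h; subst h; exact absurd ha (by decide)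
    rw [PySem.List.enumerate_cons]
    show insertDigitLoop num digit s ((k, a) :: PySem.List.enumerate t' (k + 1)) = _
    rw [insertDigitLoop, if_neg hdash, parse_single ha]
    by_cases hq : (num ≥ 0 ∧ valD a < digit) ∨ (num < 0 ∧ valD a > digit)
    · rw [if_pos hq]
      have : qA num digit a = true := by simp [qA, hq]
      simp only [gIdx, this, if_true]
      simp [retA]
    · rw [if_neg hq]
      have hqa : qA num digit a = false := by simp only [qA, decide_eq_false_iff_not]; exact hq
      rw [ih (k + 1) (fun c hc => hd c (by simp [hc]))]
      simp only [gIdx, hqa, Bool.false_eq_true, if_false, List.length_cons]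
      have : (k + 1) + (gIdx (qA num digit) t' : Int) = k + ((gIdx (qA num digit) t' + 1 : Nat) : Int) := by
        push_cast; ring
      rw [this]
      by_cases hlt : gIdx (qA num digit) t' < t'.length
      · rw [if_pos hlt, if_pos (by omega)]
      · rw [if_neg hlt, if_neg (by omega)]

-- greedy position maximizes among all insertion positions
theorem greedy_max (c : Char) (q : Char → Bool) :
    ∀ (s : List Char), (∀ d ∈ s, q d = true ↔ d < c) →
    ∀ k ≤ s.length, insAt s k c ≤ insAt s (gIdx q s) c := by
  intro s
  induction s with
  | nil =>
    intro _ k hk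
    have : k = 0 := by simpa using hk
    subst this
    exact le_refl _
  | cons a t ih =>
    intro hq k hk
    by_cases hqa : q a = true
    · have hac : a < c := (hq a (by simp)).mp hqa
      simp only [gIdx, hqa, if_true]
      cases k with
      | zero => exact le_refl _
      | succ j =>
        rw [insAt_succ_cons, insAt_zero]
        exact le_of_lt (List.Lex.rel hac)
    · have hca : ¬ a < c := fun h => (by simp [(hq a (by simp)).mpr h] at hqa)
      simp only [gIdx, hqa, Bool.false_eq_true, if_false]
      have hqt : ∀ d ∈ t, q d = true ↔ d < c := fun d hd => hq d (by simp [hd])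
      cases k with
      | zero =>
        rw [insAt_zero, insAt_succ_cons]
        rcases (not_lt.mp hca).lt_or_eq with h | h
        · exact le_of_lt (List.Lex.rel h)
        · subst h
          refine List.cons_le_cons c ?_
          have := ih hqt 0 (Nat.zero_le _)
          rwa [insAt_zero] at this
      | succ j =>
        rw [insAt_succ_cons, insAt_succ_cons]
        exact List.cons_le_cons a (ih hqt j (by simpa using hk))

-- greedy position minimizes among all insertion positions
theorem greedy_min (c : Char) (q : Char → Bool) :
    ∀ (s : List Char), (∀ d ∈ s, q d = true ↔ c < d) →
    ∀ k ≤ s.length, insAt s (gIdx q s) c ≤ insAt s k c := by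
  intro s
  induction s with
  | nil =>
    intro _ k hk
    have : k = 0 := by simpa using hk
    subst this
    exact le_refl _
  | cons a t ih =>
    intro hq k hk
    by_cases hqa : q a = true
    · have hca : c < a := (hq a (by simp)).mp hqa
      simp only [gIdx, hqa, if_true]
      cases k with
      | zero => exact le_refl _
      | succ j =>
        rw [insAt_succ_cons, insAt_zero]
        exact le_of_lt (List.Lex.rel hca)
    · have hac : ¬ c < a := fun h => (by simp [(hq a (by simp)).mpr h] at hqa)
      simp only [gIdx, hqa, Bool.false_eq_true, if_false]
      have hqt : ∀ d ∈ t, q d = true ↔ c < d := fun d hd => hq d (by simp [hd])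
      cases k with
      | zero =>
        rw [insAt_zero, insAt_succ_cons]
        rcases (not_lt.mp hac).lt_or_eq with h | h
        · exact le_of_lt (List.Lex.rel h)
        · subst h
          refine List.cons_le_cons a ?_
          have := ih hqt 0 (Nat.zero_le _)
          rwa [insAt_zero] at this
      | succ j =>
        rw [insAt_succ_cons, insAt_succ_cons]
        exact List.cons_le_cons a (ih hqt j (by simpa using hk))

-- bridges between the ports' core list-order instances and Mathlib's LinearOrder ones
theorem instBridge : (fun (a b : List Char) => a.decidableLT b) = (LinearOrder.toDecidableLT : DecidableLT (List Char)) := by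
  funext a b; exact Subsingleton.elim _ _

theorem coreMax?_isMax {L : List (List Char)} {m : List Char}
    (h : @PySem.List.max? (List Char) (List Char) List.instLT (fun a b => a.decidableLT b) L (fun x => x) = some m) :
    ∀ y ∈ L, y ≤ m := by
  rw [instBridge] at h
  exact PySem.List.max?_isMax h

theorem coreMax?_mem {L : List (List Char)} {m : List Char}
    (h : @PySem.List.max? (List Char) (List Char) List.instLT (fun a b => a.decidableLT b) L (fun x => x) = some m) :
    m ∈ L := PySem.List.max?_mem h

theorem coreMin?_isMin {L : List (List Char)} {m : List Char}
    (h : @PySem.List.min? (List Char) (List Char) List.instLT (fun a b => a.decidableLT b) L (fun x => x) = some m) :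
    ∀ y ∈ L, m ≤ y := by
  rw [instBridge] at h
  exact PySem.List.min?_isMin h

theorem coreMin?_mem {L : List (List Char)} {m : List Char}
    (h : @PySem.List.min? (List Char) (List Char) List.instLT (fun a b => a.decidableLT b) L (fun x => x) = some m) :
    m ∈ L := PySem.List.min?_mem h

-- the maximal candidate is the greedy one
theorem maxCand (s : List Char) (c : Char) (q : Char → Bool)
    (hq : ∀ d ∈ s, q d = true ↔ d < c) :
    (PySem.List.max? ((PySem.List.pyRange 0 ((s.length : Int) + 1) 1).map (fun i =>
        PySem.List.slice s none (some i) ++ [c] ++ PySem.List.slice s (some i) none))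
      (fun x => x)).getD []
      = insAt s (gIdx q s) c := by
  set L := (PySem.List.pyRange 0 ((s.length : Int) + 1) 1).map (fun i =>
      PySem.List.slice s none (some i) ++ [c] ++ PySem.List.slice s (some i) none) with hL
  have hgle := gIdx_le q s
  have hGmem : insAt s (gIdx q s) c ∈ L := by
    rw [hL]
    refine List.mem_map.mpr ⟨((gIdx q s : Nat) : Int), ?_, ?_⟩
    · rw [PySem.List.mem_pyRange_one]
      constructor
      · positivity
      · exact_mod_cast Nat.lt_succ_of_le hgle
    · rw [PySem.List.slice_to_natCast, PySem.List.slice_from_natCast]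
      simp [insAt]
  have hforms : ∀ y ∈ L, ∃ k, k ≤ s.length ∧ y = insAt s k c := by
    intro y hy
    rw [hL] at hy
    obtain ⟨i, hi, rfl⟩ := List.mem_map.mp hy
    rw [PySem.List.mem_pyRange_one] at hi
    obtain ⟨hi0, hi1⟩ := hi
    refine ⟨i.toNat, by omega, ?_⟩
    rw [PySem.List.slice_to s hi0, PySem.List.slice_from s hi0]
    simp [insAt]
  cases hm : PySem.List.max? L (fun x => x) with
  | none => exact absurd ((PySem.List.max?_eq_none_iff _ _).mp hm) (List.ne_nil_of_mem hGmem)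
  | some m =>
    have hmax := coreMax?_isMax hm
    have hmem := coreMax?_mem hm
    obtain ⟨k, hk, rfl⟩ := hforms m hmem
    simp only [Option.getD_some]
    exact le_antisymm (greedy_max c q s hq k hk) (hmax _ hGmem)

-- the minimal candidate is the greedy one
theorem minCand (s : List Char) (c : Char) (q : Char → Bool)
    (hq : ∀ d ∈ s, q d = true ↔ c < d) :
    (PySem.List.min? ((PySem.List.pyRange 0 ((s.length : Int) + 1) 1).map (fun i =>
        PySem.List.slice s none (some i) ++ [c] ++ PySem.List.slice s (some i) none))
      (fun x => x)).getD []
      = insAt s (gIdx q s) c := by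
  set L := (PySem.List.pyRange 0 ((s.length : Int) + 1) 1).map (fun i =>
      PySem.List.slice s none (some i) ++ [c] ++ PySem.List.slice s (some i) none) with hL
  have hgle := gIdx_le q s
  have hGmem : insAt s (gIdx q s) c ∈ L := by
    rw [hL]
    refine List.mem_map.mpr ⟨((gIdx q s : Nat) : Int), ?_, ?_⟩
    · rw [PySem.List.mem_pyRange_one]
      constructor
      · positivity
      · exact_mod_cast Nat.lt_succ_of_le hgle
    · rw [PySem.List.slice_to_natCast, PySem.List.slice_from_natCast]
      simp [insAt]
  have hforms : ∀ y ∈ L, ∃ k, k ≤ s.length ∧ y = insAt s k c := by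
    intro y hy
    rw [hL] at hy
    obtain ⟨i, hi, rfl⟩ := List.mem_map.mp hy
    rw [PySem.List.mem_pyRange_one] at hi
    obtain ⟨hi0, hi1⟩ := hi
    refine ⟨i.toNat, by omega, ?_⟩
    rw [PySem.List.slice_to s hi0, PySem.List.slice_from s hi0]
    simp [insAt]
  cases hm : PySem.List.min? L (fun x => x) with
  | none => exact absurd ((PySem.List.min?_eq_none_iff _ _).mp hm) (List.ne_nil_of_mem hGmem)
  | some m =>
    have hmin := coreMin?_isMin hm
    have hmem := coreMin?_mem hm
    obtain ⟨k, hk, rfl⟩ := hforms m hmem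
    simp only [Option.getD_some]
    exact le_antisymm (hmin _ hGmem) (greedy_min c q s hq k hk)

-- ===== VERDICT (by name: the statement is the Claim_ definition above) =====
theorem insert_digit_spec : Claim_equal_insert_digit := by
  intro num digit _ hpre
  obtain ⟨h0, h9⟩ := hpre
  obtain ⟨c, hc, hcd, hcv⟩ := toChars_digit h0 h9
  unfold Spec_insert_digit insert_digit insert_digit_alt
  dsimp only
  by_cases hnum : num ≥ 0
  · -- nonnegative num: both sides are the parse of the same candidate string
    have hs := toChars_nonneg hnum
    set s : List Char := Nat.toDigits 10 num.toNat with hsdef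
    have hds : ∀ d ∈ s, d.isDigit = true := toDigits_digits _
    have hqiff : ∀ d ∈ s, qA num digit d = true ↔ d < c := by
      intro d hd
      have hdd := hds d hd
      unfold qA
      rw [decide_eq_true_iff]
      constructor
      · rintro (⟨-, hlt⟩ | ⟨hneg, -⟩)
        · exact (digit_lt_iff hdd hcd).mpr (by omega)
        · omega
      · intro hlt
        exact Or.inl ⟨hnum, by have := (digit_lt_iff hdd hcd).mp hlt; omega⟩
    rw [hs, if_pos hnum, loopA_enum num digit s s 0 hds]
    set g := gIdx (qA num digit) s with hgdef
    have hgle := gIdx_le (qA num digit) s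
    have hA : (if g < s.length then some (retA num digit s (0 + (g : Int))) else none).getD
        ((PySem.Int.ofChars? (s ++ PySem.Int.toChars digit)).getD 0)
        = (PySem.Int.ofChars? (insAt s g c)).getD 0 := by
      by_cases hlt : g < s.length
      · rw [if_pos hlt]
        simp only [Option.getD_some]
        unfold retA
        rw [zero_add, PySem.List.slice_to_natCast, PySem.List.slice_from_natCast, hc]
        simp [insAt]
      · rw [if_neg hlt]
        have hgl : g = s.length := le_antisymm hgle (not_lt.mp hlt)
        simp only [Option.getD_none]
        rw [hgl, insAt_length, hc]
    rw [hA]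
    simp only [PySem.List.len_eq, hc]
    rw [maxCand s c (qA num digit) hqiff]
  · -- negative num: the sign is peeled off on both sides
    have hneg : num < 0 := not_le.mp hnum
    have hs := toChars_neg hneg
    set b : List Char := Nat.toDigits 10 num.natAbs with hbdef
    have hdb : ∀ d ∈ b, d.isDigit = true := toDigits_digits _
    have hqiff : ∀ d ∈ b, qA num digit d = true ↔ c < d := by
      intro d hd
      have hdd := hdb d hd
      unfold qA
      rw [decide_eq_true_iff]
      constructor
      · rintro (⟨hp, -⟩ | ⟨-, hgt⟩)
        · omega
        · exact (digit_lt_iff hcd hdd).mpr (by omega)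
      · intro hlt
        exact Or.inr ⟨hneg, by have := (digit_lt_iff hcd hdd).mp hlt; omega⟩
    rw [hs, if_neg hnum, PySem.List.enumerate_cons, zero_add]
    have hstep : insertDigitLoop num digit ('-' :: b) ((0, '-') :: PySem.List.enumerate b 1)
        = insertDigitLoop num digit ('-' :: b) (PySem.List.enumerate b 1) := by
      rw [insertDigitLoop]; simp
    rw [hstep, loopA_enum num digit ('-' :: b) b 1 hdb]
    set g := gIdx (qA num digit) b with hgdef
    have hgle := gIdx_le (qA num digit) b
    have hA : (if g < b.length then some (retA num digit ('-' :: b) (1 + (g : Int))) else none).getD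
        ((PySem.Int.ofChars? (('-' :: b) ++ PySem.Int.toChars digit)).getD 0)
        = (PySem.Int.ofChars? ('-' :: insAt b g c)).getD 0 := by
      by_cases hlt : g < b.length
      · rw [if_pos hlt]
        simp only [Option.getD_some]
        unfold retA
        have hcast : (1 : Int) + (g : Int) = ((g + 1 : Nat) : Int) := by push_cast; ring
        rw [hcast, PySem.List.slice_to_natCast, PySem.List.slice_from_natCast, hc]
        simp [insAt]
      · rw [if_neg hlt]
        have hgl : g = b.length := le_antisymm hgle (not_lt.mp hlt)
        simp only [Option.getD_none]
        rw [hgl, insAt_length, hc]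
        simp
    rw [hA]
    have hbody : PySem.List.slice ('-' :: b) (some 1) none = b := by
      rw [PySem.List.slice_from ('-' :: b) (by norm_num)]
      simp
    rw [hbody]
    simp only [PySem.List.len_eq, hc]
    rw [minCand b c (qA num digit) hqiff]
    rw [negParse _ (insAt_digits hdb hcd g)]
    cases hp : PySem.Int.ofChars? (insAt b g c) <;> simp
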